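-- pv_equiv track=rewrite | github.com/mmcintyre1/advent_of_code_2019_python | 08/part_2.py | layer_slice
-- ===== SOURCE A (Python) =====
-- def layer_slice(input_str, height, width):
--     blocks_per_layer = height * width
--     layer_count = len(input_str) // blocks_per_layer
--     layer_slices = []
--
--     for i in range(blocks_per_layer):
--         layer_row = []
--         for j in range(layer_count):
--             layer_row.append(input_str[j * blocks_per_layer + i])
--
--         layer_slices.append(layer_row)
--
--     return layer_slices
-- ===== SOURCE B (Python) =====
-- def layer_slice(input_str, height, width):
--     bpl = height * width
--     layer_count = len(input_str) // bpl
--     layers = [list(input_str[k * bpl:(k + 1) * bpl]) for k in range(layer_count)]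
--     return [[layer[i] for layer in layers] for i in range(bpl)]
-- ===== Notes on version B (the rewrite author's own statement) =====
-- stated objective: idiomatic
-- what changed: Instead of A's nested index loops computing input_str[j*bpl+i] per pixel, B first cuts the string into layer lists via slices and then transposes by reading element i of each prebuilt layer.
import Mathlib
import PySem

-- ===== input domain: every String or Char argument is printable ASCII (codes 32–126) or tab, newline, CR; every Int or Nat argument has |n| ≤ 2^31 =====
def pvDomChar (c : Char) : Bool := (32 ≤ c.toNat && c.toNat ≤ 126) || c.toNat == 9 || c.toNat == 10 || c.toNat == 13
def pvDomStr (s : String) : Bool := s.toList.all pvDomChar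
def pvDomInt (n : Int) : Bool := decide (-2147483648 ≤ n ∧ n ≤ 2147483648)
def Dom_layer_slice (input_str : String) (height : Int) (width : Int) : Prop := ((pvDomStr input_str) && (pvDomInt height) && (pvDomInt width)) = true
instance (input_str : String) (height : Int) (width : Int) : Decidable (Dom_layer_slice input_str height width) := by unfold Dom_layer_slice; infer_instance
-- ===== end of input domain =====

-- B first cuts the string into its layers with slices, then transposes those layer lists (idiomatic decomposition); same return value.

-- ===== PORT A =====
def layer_slice (input_str : String) (height : Int) (width : Int) : List (List String) :=
  let blocks_per_layer := height * width
  let layer_count := PySem.Int.floordiv (PySem.Str.len input_str) blocks_per_layer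
  (PySem.List.pyRange 0 blocks_per_layer 1).foldl (fun layer_slices i =>
    layer_slices ++ [
      (PySem.List.pyRange 0 layer_count 1).foldl (fun layer_row j =>
        layer_row ++ [((PySem.Str.pyGet? input_str (j * blocks_per_layer + i)).map
                        (fun c => String.ofList [c])).getD ""]) [] ]) []

-- ===== PORT B =====
def layer_slice_alt (input_str : String) (height : Int) (width : Int) : List (List String) :=
  let bpl := height * width
  let layer_count := PySem.Int.floordiv (PySem.Str.len input_str) bpl
  let layers := (PySem.List.pyRange 0 layer_count 1).map (fun k =>
      (PySem.Str.slice input_str (some (k * bpl)) (some ((k + 1) * bpl))).toList)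
  (PySem.List.pyRange 0 bpl 1).map (fun i =>
    layers.map (fun layer =>
      ((PySem.List.pyGet? layer i).map (fun c => String.ofList [c])).getD ""))

-- ===== PRECONDITION & SPEC =====
-- A raises ZeroDivisionError exactly when height * width = 0 (B raises there too); only those inputs are excluded.
def Pre_layer_slice (input_str : String) (height : Int) (width : Int) : Prop := height * width ≠ 0
instance (input_str : String) (height : Int) (width : Int) : Decidable (Pre_layer_slice input_str height width) := by unfold Pre_layer_slice; infer_instance
def pvWitness_layer_slice : String × Int × Int := ("123456", 1, 3)
def Spec_layer_slice (input_str : String) (height : Int) (width : Int) (out : List (List String)) : Prop := out = layer_slice_alt input_str height width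
instance (input_str : String) (height : Int) (width : Int) (out : List (List String)) : Decidable (Spec_layer_slice input_str height width out) := by unfold Spec_layer_slice; infer_instance

-- ===== CLAIM (what is proved, stated in full; the proofs are below) =====
def Claim_equal_layer_slice : Prop := ∀ (input_str : String) (height : Int) (width : Int), Dom_layer_slice input_str height width → Pre_layer_slice input_str height width → Spec_layer_slice input_str height width (layer_slice input_str height width)

-- ===== LEMMAS AND PROOFS =====

-- One cell: element i of B's k-th layer slice is A's character at index k*bpl + i (chars level).
theorem layer_slice_cell_eq (cs : List Char) (bpl k i : Int) (hb : 0 < bpl)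
    (hk : 0 ≤ k) (hi : 0 ≤ i) (hib : i < bpl) (hlen : (k + 1) * bpl ≤ (cs.length : Int)) :
    PySem.List.pyGet? (PySem.List.slice cs (some (k * bpl)) (some ((k + 1) * bpl))) i
      = PySem.List.pyGet? cs (k * bpl + i) := by
  have ha : 0 ≤ k * bpl := by positivity
  have hb' : 0 ≤ (k + 1) * bpl := by positivity
  rw [PySem.List.slice_toNat cs ha hb']
  have hring : (k + 1) * bpl = k * bpl + bpl := by ring
  have hidx : k * bpl + i < (cs.length : Int) := by omega
  have hidx0 : 0 ≤ k * bpl + i := by omega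
  have hlenlist : (((cs.drop (k*bpl).toNat).take (((k+1)*bpl).toNat - (k*bpl).toNat)).length : Int)
      = bpl := by
    simp [List.length_take, List.length_drop]
    omega
  rw [PySem.List.pyGet?_eq_some_getElem _ hi (by rw [hlenlist]; omega),
      PySem.List.pyGet?_eq_some_getElem _ hidx0 hidx]
  congr 1
  rw [List.getElem_take, List.getElem_drop]
  congr 1
  omega

-- ===== VERDICT (by name: the statement is the Claim_ definition above) =====
theorem layer_slice_spec : Claim_equal_layer_slice := by
  intro s h w _ hpre
  have hne : h * w ≠ 0 := hpre
  show layer_slice s h w = layer_slice_alt s h w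
  rcases lt_or_gt_of_ne hne with hneg | hpos
  · have hz : (h * w).toNat = 0 := by omega
    simp [layer_slice, layer_slice_alt, PySem.List.pyRange_one, hz]
  · simp only [layer_slice, layer_slice_alt, PySem.List.foldl_append_singleton_eq_map,
      List.nil_append, List.map_map]
    set bpl : Int := h * w
    set lc : Int := PySem.Int.floordiv (PySem.Str.len s) bpl with hlcdef
    have hlc : lc = (s.toList.length : Int) / bpl := by
      rw [hlcdef, PySem.Int.floordiv_eq_ediv_of_pos hpos]; simp [PySem.Str.len_eq]
    have hmul : lc * bpl ≤ (s.toList.length : Int) := by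
      rw [hlc]; exact Int.ediv_mul_le _ (by omega)
    apply List.map_congr_left
    intro i hi
    rw [PySem.List.mem_pyRange_one] at hi
    apply List.map_congr_left
    intro k hk
    rw [PySem.List.mem_pyRange_one] at hk
    simp only [Function.comp]
    have hkb : (k + 1) * bpl ≤ (s.toList.length : Int) := by
      have : (k + 1) * bpl ≤ lc * bpl := by
        apply mul_le_mul_of_nonneg_right (by omega) hpos.le
      omega
    have key := layer_slice_cell_eq s.toList bpl k i hpos hk.1 hi.1 hi.2 hkb
    have hstr : (PySem.Str.slice s (some (k * bpl)) (some ((k + 1) * bpl))).toList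
        = PySem.List.slice s.toList (some (k * bpl)) (some ((k + 1) * bpl)) := by
      simp [PySem.Str.toList_slice]
    rw [hstr, key]
    simp [PySem.Str.pyGet?]
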